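-- pv_equiv track=rewrite | github.com/evalime/HangMan | app.py | encryptWord
-- ===== SOURCE A (Python) =====
-- def encryptWord(word):
--     #Making the blank lines
--     dashes = ''
--     for x in word:
--         if x == ' ':
--             dashes += ' '
--             continue
--         dashes += '_'
--     return dashes
-- ===== SOURCE B (Python) =====
-- def encryptWord(word):
--     # Mask via split on single spaces, run-length underscores, and rejoin.
--     return ' '.join('_' * len(part) for part in word.split(' '))
-- ===== Notes on version B (the rewrite author's own statement) =====
-- stated objective: faster
-- what changed: Replaces the per-character loop-and-branch string accumulation with a split / run-length-underscore / join pipeline, avoiding repeated string concatenation.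
import Mathlib
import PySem

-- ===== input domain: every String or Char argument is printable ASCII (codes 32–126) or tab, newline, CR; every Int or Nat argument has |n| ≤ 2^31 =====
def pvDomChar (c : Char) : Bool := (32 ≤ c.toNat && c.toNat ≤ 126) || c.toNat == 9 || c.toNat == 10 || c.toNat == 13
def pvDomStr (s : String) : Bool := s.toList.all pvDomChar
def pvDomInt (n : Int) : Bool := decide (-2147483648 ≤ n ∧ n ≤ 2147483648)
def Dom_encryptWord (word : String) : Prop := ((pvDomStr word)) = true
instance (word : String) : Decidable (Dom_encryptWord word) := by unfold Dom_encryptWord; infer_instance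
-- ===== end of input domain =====

-- B masks the word by splitting on single spaces and joining underscore runs instead of A's per-character loop (objective: idiomatic).
-- ===== PORT A =====
-- for x in word: dashes += ' ' if x == ' ' else '_' — the accumulator is the List Char of the string
def encryptWord (word : String) : String :=
  String.ofList
    (word.toList.foldl
      (fun dashes x => if x == ' ' then dashes ++ [' '] else dashes ++ ['_']) [])

-- ===== PORT B =====
-- word.split(' ') with a nonempty separator is PySem.Chars.splitOn; '_' * len(part) is List.replicate
def encryptWord_alt (word : String) : String :=
  PySem.Str.join " "
    ((PySem.Chars.splitOn word.toList " ".toList).map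
      (fun part => String.ofList (List.replicate part.length '_')))

-- ===== PRECONDITION & SPEC =====
def Spec_encryptWord (word : String) (out : String) : Prop := out = encryptWord_alt word
instance (word : String) (out : String) : Decidable (Spec_encryptWord word out) := by unfold Spec_encryptWord; infer_instance

-- ===== CLAIM (what is proved, stated in full; the proofs are below) =====
def Claim_equal_encryptWord : Prop := ∀ (word : String), Dom_encryptWord word → Spec_encryptWord word (encryptWord word)

-- ===== LEMMAS AND PROOFS =====

def maskChar (c : Char) : Char := if c == ' ' then ' ' else '_'

def splitSimple : List Char → List Char → List (List Char)
  | cur, [] => [cur.reverse]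
  | cur, c :: rest =>
      if c == ' ' then cur.reverse :: splitSimple [] rest else splitSimple (c :: cur) rest

theorem splitSimple_ne_nil (cur cs : List Char) : splitSimple cur cs ≠ [] := by
  induction cs generalizing cur with
  | nil => simp [splitSimple]
  | cons c rest ih =>
      simp only [splitSimple]
      split
      · simp
      · exact ih _

theorem go_eq (fuel : Nat) : ∀ (l cur : List Char) (acc : List (List Char)), l.length < fuel →
    PySem.Chars.splitOn.go [' '] fuel l cur acc = acc.reverse ++ splitSimple cur l := by
  induction fuel with
  | zero => intro l cur acc h; omega
  | succ n ih =>
      intro l cur acc h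
      cases l with
      | nil => simp [PySem.Chars.splitOn.go, splitSimple]
      | cons c rest =>
          rw [show PySem.Chars.splitOn.go [' '] (n+1) (c::rest) cur acc =
              (if List.isPrefixOf [' '] (c::rest) then
                 PySem.Chars.splitOn.go [' '] n (List.drop [' '].length (c::rest)) [] (cur.reverse :: acc)
               else PySem.Chars.splitOn.go [' '] n rest (c :: cur) acc) from rfl]
          by_cases hc : c = ' '
          · subst hc
            rw [if_pos (by simp [List.isPrefixOf])]
            rw [ih _ _ _ (by simp only [List.length_cons] at h; simpa using Nat.lt_of_succ_lt_succ h)]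
            simp [splitSimple]
          · rw [if_neg (by simp [List.isPrefixOf, Ne.symm hc])]
            rw [ih _ _ _ (by simp only [List.length_cons] at h; exact Nat.lt_of_succ_lt_succ h)]
            simp [splitSimple, hc]

theorem splitOn_eq (cs : List Char) :
    PySem.Chars.splitOn cs [' '] = splitSimple [] cs := by
  have := go_eq (cs.length + 1) cs [] [] (by omega)
  simpa [PySem.Chars.splitOn] using this

theorem join_mask (cs : List Char) : ∀ cur : List Char,
    PySem.Chars.join [' ']
      ((splitSimple cur cs).map (fun p => List.replicate p.length '_')) =
    List.replicate cur.length '_' ++ cs.map maskChar := by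
  induction cs with
  | nil =>
      intro cur
      simp [splitSimple, PySem.Chars.join, List.intercalate]
  | cons c rest ih =>
      intro cur
      by_cases hc : c = ' '
      · subst hc
        obtain ⟨p, ps, hps⟩ : ∃ p ps, splitSimple [] rest = p :: ps := by
          cases h : splitSimple [] rest with
          | nil => exact absurd h (splitSimple_ne_nil [] rest)
          | cons p ps => exact ⟨p, ps, rfl⟩
        have ihr := ih []
        rw [hps] at ihr
        rw [show splitSimple cur (' ' :: rest) = cur.reverse :: splitSimple [] rest by
              simp [splitSimple]]
        have ihr2 : PySem.Chars.join [' ']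
            (List.replicate p.length '_' :: List.map (fun q => List.replicate q.length '_') ps) =
            List.map maskChar rest := by simpa using ihr
        rw [hps, List.map_cons, List.map_cons, PySem.Chars.join_cons_cons, ihr2]
        simp [maskChar]
      · simp only [splitSimple]
        rw [if_neg (show ¬ ((c == ' ') = true) by simpa using hc)]
        rw [ih (c :: cur)]
        simp [maskChar, hc, List.replicate_succ', List.append_assoc]

theorem foldl_mask (cs : List Char) : ∀ acc : List Char,
    cs.foldl (fun dashes x => if x == ' ' then dashes ++ [' '] else dashes ++ ['_']) acc =
    acc ++ cs.map maskChar := by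
  induction cs with
  | nil => intro acc; simp
  | cons c rest ih =>
      intro acc
      by_cases hc : c = ' '
      · subst hc; rw [List.foldl_cons, ih]; simp [maskChar]
      · rw [List.foldl_cons, ih]; simp [maskChar, hc]

-- ===== VERDICT (by name: the statement is the Claim_ definition above) =====
theorem encryptWord_spec : Claim_equal_encryptWord := by
  intro word _
  unfold Spec_encryptWord encryptWord encryptWord_alt PySem.Str.join
  have hsep : " ".toList = [' '] := rfl
  rw [foldl_mask, hsep, splitOn_eq]
  congr 1
  rw [List.map_map]
  have : (String.toList ∘ fun part => String.ofList (List.replicate part.length '_')) =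
      fun part : List Char => List.replicate part.length '_' := by
    funext p; simp
  rw [this]
  simpa using (join_mask word.toList []).symm
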